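-- pv_equiv track=rewrite | github.com/iTeam-S/FORUM | bot/options.py | resultat_de_test_kavio
-- ===== SOURCE A (Python) =====
-- def resultat_de_test_kavio(data):
--     max = 0
--     for i in range(len(data)):
--         if max < data[i][1]:
--             max = data[i][1]
--         else:
--             max = max
--
--     categ_max = []
--     for values in data:
--         if values[1] == max:
--             categ_max.append(
--                 values[0]
--             )
--         pass
--     return categ_max
-- ===== SOURCE B (Python) =====
-- def resultat_de_test_kavio(data):
--     best = 0
--     result = []
--     for values in data:
--         if best < values[1]:
--             best = values[1]
--             result = [values[0]]
--         elif values[1] == best: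
--             result.append(values[0])
--     return result
-- ===== Notes on version B (the rewrite author's own statement) =====
-- stated objective: alternative
-- what changed: Replaced A's two-pass find-max-then-filter with a single pass keeping a running maximum and resetting the accumulator whenever a new maximum appears.
import Mathlib
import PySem

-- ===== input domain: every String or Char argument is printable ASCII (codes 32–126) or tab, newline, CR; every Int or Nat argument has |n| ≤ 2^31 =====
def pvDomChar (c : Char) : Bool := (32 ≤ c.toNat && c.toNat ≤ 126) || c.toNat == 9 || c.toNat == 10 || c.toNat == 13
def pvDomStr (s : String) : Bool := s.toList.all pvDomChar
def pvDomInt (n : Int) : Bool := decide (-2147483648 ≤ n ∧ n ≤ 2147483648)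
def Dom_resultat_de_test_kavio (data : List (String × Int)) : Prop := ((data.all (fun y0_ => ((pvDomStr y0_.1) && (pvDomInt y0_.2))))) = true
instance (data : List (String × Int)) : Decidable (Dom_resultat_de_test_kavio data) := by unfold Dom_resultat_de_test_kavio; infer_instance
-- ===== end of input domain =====

-- A's two passes (find max, then filter) replaced by one pass with a running maximum and a reset accumulator; same O(n) cost.


-- ===== PORT A =====
def resultat_de_test_kavio (data : List (String × Int)) : List String :=
  -- first loop: for i in range(len(data)): if max < data[i][1]: max = data[i][1] else: max = max
  let max : Int :=
    (PySem.List.pyRange 0 (PySem.List.len data) 1).foldl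
      (fun m i =>
        if m < (PySem.List.pyGetD data i ("", 0)).2 then (PySem.List.pyGetD data i ("", 0)).2
        else m) 0
  -- second loop: append values[0] when values[1] == max
  data.foldl (fun categ_max values =>
    if values.2 = max then categ_max ++ [values.1] else categ_max) []

-- ===== PORT B =====
def resultat_de_test_kavio_alt (data : List (String × Int)) : List String :=
  (data.foldl (fun (st : Int × List String) values =>
    if st.1 < values.2 then (values.2, [values.1])
    else if values.2 = st.1 then (st.1, st.2 ++ [values.1])
    else st) (0, [])).2

-- ===== PRECONDITION & SPEC =====
def Spec_resultat_de_test_kavio (data : List (String × Int)) (out : List String) : Prop := out = resultat_de_test_kavio_alt data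
instance (data : List (String × Int)) (out : List String) : Decidable (Spec_resultat_de_test_kavio data out) := by unfold Spec_resultat_de_test_kavio; infer_instance

-- ===== CLAIM (what is proved, stated in full; the proofs are below) =====
def Claim_equal_resultat_de_test_kavio : Prop := ∀ (data : List (String × Int)), Dom_resultat_de_test_kavio data → Spec_resultat_de_test_kavio data (resultat_de_test_kavio data)

-- ===== LEMMAS AND PROOFS =====

-- A's max accumulator, B's step, A's filter accumulator — named for the lemmas
def pvMaxAcc (d : List (String × Int)) (m : Int) : Int :=
  d.foldl (fun m p => if m < p.2 then p.2 else m) m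

def pvFilterAcc (d : List (String × Int)) (m : Int) : List String :=
  d.foldl (fun acc p => if p.2 = m then acc ++ [p.1] else acc) []

def pvStep (st : Int × List String) (p : String × Int) : Int × List String :=
  if st.1 < p.2 then (p.2, [p.1])
  else if p.2 = st.1 then (st.1, st.2 ++ [p.1])
  else st

theorem pvMaxAcc_le (d : List (String × Int)) (m : Int) : m ≤ pvMaxAcc d m := by
  induction d generalizing m with
  | nil => simp [pvMaxAcc]
  | cons p t ih =>
      simp only [pvMaxAcc, List.foldl_cons]
      split_ifs with h
      · exact le_of_lt (lt_of_lt_of_le h (ih p.2))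
      · exact ih m

theorem pvFilterAcc_eq (d : List (String × Int)) (m : Int) :
    pvFilterAcc d m = (d.filter (fun x => decide (x.2 = m))).map Prod.fst := by
  simpa using PySem.List.foldl_append_ite (p := fun x : String × Int => x.2 = m)
    (f := Prod.fst) (l := d) (acc := [])

theorem pvFilterAcc_cons (p : String × Int) (t : List (String × Int)) (m : Int) :
    pvFilterAcc (p :: t) m = (if p.2 = m then [p.1] else []) ++ pvFilterAcc t m := by
  simp [pvFilterAcc_eq, List.filter_cons]
  split_ifs with h <;> simp

-- single-pass invariant: running state (m, acc) versus A's two separate folds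
theorem pvInvariant (d : List (String × Int)) (m : Int) (acc : List String) :
    d.foldl pvStep (m, acc) =
      (pvMaxAcc d m, (if m = pvMaxAcc d m then acc else []) ++ pvFilterAcc d (pvMaxAcc d m)) := by
  induction d generalizing m acc with
  | nil => simp [pvMaxAcc, pvFilterAcc]
  | cons p t ih =>
      simp only [List.foldl_cons]
      by_cases h1 : m < p.2
      · have hM : pvMaxAcc (p :: t) m = pvMaxAcc t p.2 := by
          simp [pvMaxAcc, h1]
        have hne : m ≠ pvMaxAcc t p.2 :=
          ne_of_lt (lt_of_lt_of_le h1 (pvMaxAcc_le t p.2))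
        rw [show pvStep (m, acc) p = (p.2, [p.1]) by simp [pvStep, h1], ih,
          pvFilterAcc_cons, hM]
        simp [hne]
      · have hM : pvMaxAcc (p :: t) m = pvMaxAcc t m := by
          simp [pvMaxAcc, h1]
        by_cases h2 : p.2 = m
        · rw [show pvStep (m, acc) p = (m, acc ++ [p.1]) by simp [pvStep, h2], ih,
            pvFilterAcc_cons, hM]
          by_cases h3 : m = pvMaxAcc t m
          · simp [← h3, h2]
          · have : p.2 ≠ pvMaxAcc t m := h2 ▸ h3
            simp [h3, this]
        · have h4 : p.2 < m := lt_of_le_of_ne (le_of_not_gt h1) h2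
          have h5 : p.2 ≠ pvMaxAcc t m :=
            ne_of_lt (lt_of_lt_of_le h4 (pvMaxAcc_le t m))
          rw [show pvStep (m, acc) p = (m, acc) by simp [pvStep, h1, h2], ih,
            pvFilterAcc_cons, hM]
          simp [h5]

-- ===== VERDICT (by name: the statement is the Claim_ definition above) =====
theorem resultat_de_test_kavio_spec : Claim_equal_resultat_de_test_kavio := by
  unfold Claim_equal_resultat_de_test_kavio
  intro data _
  show resultat_de_test_kavio data = resultat_de_test_kavio_alt data
  unfold resultat_de_test_kavio resultat_de_test_kavio_alt
  rw [PySem.List.foldl_pyRange_zero_pyGetD data ("", 0)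
    (fun m (v : String × Int) => if m < v.2 then v.2 else m) 0]
  show pvFilterAcc data (pvMaxAcc data 0) = (data.foldl pvStep (0, [])).2
  rw [pvInvariant]
  simp
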